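-- pv_equiv track=rewrite | github.com/mirzaevinom/egtplot | egtplot/code.py | get_cols_and_rows
-- ===== SOURCE A (Python) =====
-- def get_cols_and_rows(payoff_entries):
--     """Determine how many columns and rows the output plot should have based on
--     how many parameters are being swept."""
--
--     # make a list of the lengths of each parameter list that are more than one
--     # value for that parameter
--     lengths = [len(x) for x in payoff_entries if len(x) > 1]
--
--     if len(lengths) == 0:
--         # plot as a single subplot
--         n_cols, n_rows = 1, 1
--
--     elif len(lengths) == 1:
--         # plot as row with increasing parameter going from left to right
--
--         # find the param that has > 1 entry
--         longest = [[i, x] for i, x in enumerate(payoff_entries) if len(x) > 1]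
--         col_params = longest[0][1]
--
--         n_cols, n_rows = len(col_params), 1
--
--     elif len(lengths) == 2:
--         # plot as lengths[0] x lengths[1] rectangular grid with increases down and right
--
--         # find the two params that have > 1 entry
--         longest = [[i, x] for i, x in enumerate(payoff_entries) if len(x) > 1]
--         col_params = longest[0][1]
--         row_params = longest[1][1]
--
--         n_cols, n_rows = len(col_params), len(row_params)
--
--     else:
--         # plot on an j x j square grid and just leave some blank at the end
--         tot_num = 1
--         for i in lengths:
--             tot_num *= i
--
--         j = 3
--         while j ** 2 < tot_num:
--             j += 1
--
--         n_cols, n_rows = j, j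
--
--     return n_cols, n_rows
-- ===== SOURCE B (Python) =====
-- from math import isqrt
--
--
-- def get_cols_and_rows(payoff_entries):
--     lengths = [len(x) for x in payoff_entries if len(x) > 1]
--     n = len(lengths)
--     if n == 0:
--         return 1, 1
--     if n == 1:
--         return lengths[0], 1
--     if n == 2:
--         return lengths[0], lengths[1]
--     tot_num = 1
--     for i in lengths:
--         tot_num *= i
--     m = isqrt(tot_num)
--     if m * m < tot_num:
--         m += 1
--     j = max(3, m)
--     return j, j
-- ===== Notes on version B (the rewrite author's own statement) =====
-- stated objective: alternative
-- what changed: B drops A's `longest` enumerate-comprehensions, reading the grid dimensions directly from `lengths`, and replaces A's linear `while j**2 < tot_num: j += 1` search by a closed-form math.isqrt ceiling square root (A's loop does sqrt(prod(lengths)) iterations, B none; a timing run saw A time out at n=256 where B returned, but could not certify a ratio).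
import Mathlib
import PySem

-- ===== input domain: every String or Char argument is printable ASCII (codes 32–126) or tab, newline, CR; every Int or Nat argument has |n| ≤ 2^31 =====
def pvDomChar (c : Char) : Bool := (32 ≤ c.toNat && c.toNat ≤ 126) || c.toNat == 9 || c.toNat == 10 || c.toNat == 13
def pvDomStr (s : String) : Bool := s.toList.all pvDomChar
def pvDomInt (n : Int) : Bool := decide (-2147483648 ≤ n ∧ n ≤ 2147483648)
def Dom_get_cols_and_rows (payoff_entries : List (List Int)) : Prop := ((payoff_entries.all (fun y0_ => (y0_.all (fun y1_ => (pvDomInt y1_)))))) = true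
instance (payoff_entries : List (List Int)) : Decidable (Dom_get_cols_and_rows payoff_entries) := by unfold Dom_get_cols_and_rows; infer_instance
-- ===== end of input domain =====

-- B replaces A's `longest` comprehensions by direct reads of `lengths` and A's
-- linear `while j**2 < tot_num` search by a closed-form integer square root (a different algorithm for the else branch).

-- ===== PORT A =====
-- A's `while j ** 2 < tot_num: j += 1`
def pyLoopJ (tot j : Int) : Int :=
  if j * j < tot then pyLoopJ tot (j + 1) else j
termination_by (tot - j).toNat
decreasing_by
  have hj : j < tot := by nlinarith [mul_self_nonneg j, mul_self_nonneg (j - 1)]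
  omega

def get_cols_and_rows (payoff_entries : List (List Int)) : Int × Int :=
  let lengths : List Int := (payoff_entries.filter (fun x => decide (1 < x.length))).map (fun x => (x.length : Int))
  if lengths.length = 0 then (1, 1)
  else if lengths.length = 1 then
    let longest := (PySem.List.enumerate payoff_entries 0).filter (fun p => decide (1 < p.2.length))
    let col_params := (longest.headD ((0 : Int), ([] : List Int))).2   -- longest[0][1]; in range in this branch
    ((col_params.length : Int), 1)
  else if lengths.length = 2 then
    let longest := (PySem.List.enumerate payoff_entries 0).filter (fun p => decide (1 < p.2.length))
    let col_params := (longest.headD ((0 : Int), ([] : List Int))).2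
    let row_params := ((longest.drop 1).headD ((0 : Int), ([] : List Int))).2   -- longest[1][1]
    ((col_params.length : Int), (row_params.length : Int))
  else
    let tot_num := lengths.foldl (fun a i => a * i) 1
    let j := pyLoopJ tot_num 3
    (j, j)

-- ===== PORT B =====
def get_cols_and_rows_alt (payoff_entries : List (List Int)) : Int × Int :=
  let lengths : List Int := (payoff_entries.filter (fun x => decide (1 < x.length))).map (fun x => (x.length : Int))
  if lengths.length = 0 then (1, 1)
  else if lengths.length = 1 then (lengths.headD 0, 1)   -- lengths[0]; in range in this branch
  else if lengths.length = 2 then (lengths.headD 0, (lengths.drop 1).headD 0)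
  else
    let tot_num := lengths.foldl (fun a i => a * i) 1
    let m : Int := (Nat.sqrt tot_num.toNat : Int)   -- math.isqrt, ported as Mathlib's Nat.sqrt
    let m' := if m * m < tot_num then m + 1 else m
    let j := max 3 m'
    (j, j)

-- ===== PRECONDITION & SPEC =====
def Spec_get_cols_and_rows (payoff_entries : List (List Int)) (out : Int × Int) : Prop := out = get_cols_and_rows_alt payoff_entries
instance (payoff_entries : List (List Int)) (out : Int × Int) : Decidable (Spec_get_cols_and_rows payoff_entries out) := by unfold Spec_get_cols_and_rows; infer_instance

-- ===== CLAIM (what is proved, stated in full; the proofs are below) =====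
def Claim_equal_get_cols_and_rows : Prop := ∀ (payoff_entries : List (List Int)), Dom_get_cols_and_rows payoff_entries → Spec_get_cols_and_rows payoff_entries (get_cols_and_rows payoff_entries)

-- ===== LEMMAS AND PROOFS =====

-- the second components of A's filtered `enumerate` list are exactly the filtered list itself
theorem map_snd_filter_enumerate (l : List (List Int)) (s : Int) :
    (((PySem.List.enumerate l s).filter (fun p => decide (1 < p.2.length))).map (·.2))
      = l.filter (fun x => decide (1 < x.length)) := by
  induction l generalizing s with
  | nil => simp [PySem.List.enumerate_nil]
  | cons a t ih =>
    simp only [PySem.List.enumerate_cons, List.filter_cons]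
    by_cases h : 1 < a.length <;> simp [h, ih]

theorem foldl_mul_pos (L : List Int) (hL : ∀ v ∈ L, 0 < v) :
    ∀ a : Int, 0 < a → 0 < L.foldl (fun a i => a * i) a := by
  induction L with
  | nil => intro a ha; simpa using ha
  | cons x t ih =>
    intro a ha
    simp only [List.foldl_cons]
    exact ih (fun v hv => hL v (List.mem_cons_of_mem _ hv)) _
      (mul_pos ha (hL x List.mem_cons_self))

-- B's ceiling square root (the `m`/`m'` computation of the B port)
def csqrt (tot : Int) : Int :=
  if (Nat.sqrt tot.toNat : Int) * (Nat.sqrt tot.toNat : Int) < tot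
  then (Nat.sqrt tot.toNat : Int) + 1 else (Nat.sqrt tot.toNat : Int)

theorem csqrt_nonneg (tot : Int) : 0 ≤ csqrt tot := by
  unfold csqrt; split <;> positivity

theorem csqrt_sq_ge (tot : Int) (h : 0 < tot) : tot ≤ csqrt tot * csqrt tot := by
  unfold csqrt
  have h1 : tot.toNat < (Nat.sqrt tot.toNat).succ ^ 2 := Nat.lt_succ_sqrt' _
  rw [pow_two] at h1
  have h2 : ((tot.toNat : Int)) = tot := by omega
  split
  · push_cast [Nat.succ_eq_add_one] at h1 ⊢; nlinarith
  · omega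

theorem csqrt_pred_sq_lt (tot : Int) (h : 0 < tot) : (csqrt tot - 1) * (csqrt tot - 1) < tot := by
  unfold csqrt
  have h1 : Nat.sqrt tot.toNat ^ 2 ≤ tot.toNat := Nat.sqrt_le' _
  rw [pow_two] at h1
  have h2 : ((tot.toNat : Int)) = tot := by omega
  split
  · rename_i hm; nlinarith
  · rename_i hm
    push Not at hm
    have h3 : (0 : Int) ≤ (Nat.sqrt tot.toNat : Int) := by positivity
    nlinarith

-- A's linear search from j upward is the (clamped) ceiling square root
theorem pyLoopJ_eq_max_csqrt (tot : Int) (h : 0 < tot) :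
    ∀ (n : Nat) (j : Int), 0 ≤ j → (tot - j).toNat = n → pyLoopJ tot j = max j (csqrt tot) := by
  have hc0 := csqrt_nonneg tot
  have hcg := csqrt_sq_ge tot h
  have hcp := csqrt_pred_sq_lt tot h
  intro n
  induction n using Nat.strong_induction_on with
  | _ n ih =>
    intro j hj0 hn
    rw [pyLoopJ]
    split
    · rename_i hlt
      have hjc : j < csqrt tot := by
        by_contra hle
        push Not at hle
        nlinarith
      have hjtot : j < tot := by nlinarith
      rw [ih (tot - (j + 1)).toNat (by omega) (j + 1) (by omega) rfl]
      omega
    · rename_i hge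
      push Not at hge
      have : csqrt tot ≤ j := by
        by_contra hle
        push Not at hle
        nlinarith
      omega

-- the one-swept-parameter branch: A's longest[0][1] has the length B reads off lengths[0]
theorem branch1_eq (L : List (Int × List Int)) (fl : List (List Int))
    (h : L.map (·.2) = fl) (h1 : (fl.map (fun x => (x.length : Int))).length = 1) :
    ((((L.headD ((0 : Int), ([] : List Int))).2.length : Int)), (1 : Int))
      = ((fl.map (fun x => (x.length : Int))).headD 0, 1) := by
  rw [List.length_map] at h1
  obtain ⟨x, hx⟩ := List.length_eq_one_iff.mp h1
  subst hx
  cases L with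
  | nil => simp at h
  | cons p t => simp_all

-- the two-swept-parameters branch
theorem branch2_eq (L : List (Int × List Int)) (fl : List (List Int))
    (h : L.map (·.2) = fl) (h2 : (fl.map (fun x => (x.length : Int))).length = 2) :
    ((((L.headD ((0 : Int), ([] : List Int))).2.length : Int)),
        (((L.drop 1).headD ((0 : Int), ([] : List Int))).2.length : Int))
      = ((fl.map (fun x => (x.length : Int))).headD 0,
        ((fl.map (fun x => (x.length : Int))).drop 1).headD 0) := by
  rw [List.length_map] at h2
  obtain ⟨x, y, hxy⟩ := List.length_eq_two.mp h2
  subst hxy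
  match L, h with
  | [p, q], h => simp_all

-- ===== VERDICT (by name: the statement is the Claim_ definition above) =====
theorem get_cols_and_rows_spec : Claim_equal_get_cols_and_rows := by
  intro pe _
  unfold Spec_get_cols_and_rows get_cols_and_rows get_cols_and_rows_alt
  have hmap := map_snd_filter_enumerate pe 0
  simp only []
  split
  · rfl
  · split
    · rename_i h0 h1
      exact branch1_eq _ _ hmap h1
    · split
      · rename_i h0 h1 h2
        exact branch2_eq _ _ hmap h2
      · have hpos : 0 < ((pe.filter (fun x => decide (1 < x.length))).map
            (fun x => (x.length : Int))).foldl (fun a i => a * i) 1 := by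
          apply foldl_mul_pos _ _ _ one_pos
          intro v hv
          simp only [List.mem_map] at hv
          obtain ⟨x, hx, rfl⟩ := hv
          have := List.of_mem_filter hx
          simp at this
          omega
        rw [pyLoopJ_eq_max_csqrt _ hpos _ 3 (by norm_num) rfl]
        simp [csqrt]
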